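-- pv_equiv track=rewrite | github.com/linhdvu14/cp-sols | sols/CodeForces/1629_d2/C_Meximum_Array.py | solve
-- ===== SOURCE A (Python) =====
-- def solve(N, A):
--     cnt = [0] * (N + 1)
--     for a in A: cnt[a] += 1
--
--     mex = N + 1
--     for a, c in enumerate(cnt):
--         if c == 0:
--             mex = a
--             break
--
--     res = []
--     seen = set()
--     nmex = mex
--     for a in A:
--         if a < mex: seen.add(a)
--         cnt[a] -= 1
--         if cnt[a] == 0: nmex = min(nmex, a)
--         if len(seen) == mex:
--             res.append(mex)
--             seen = set()
--             mex = nmex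
--     return res
-- ===== SOURCE B (Python) =====
-- def solve(N, A):
--     cnt = [0] * (N + 1)
--     for a in A:
--         cnt[a] += 1
--     res = []
--     i, n = 0, len(A)
--     while i < n:
--         # mex of the remaining suffix: first value with zero count
--         mex = 0
--         while mex <= N and cnt[mex] != 0:
--             mex += 1
--         # consume elements until mex distinct values below mex are seen
--         seen = set()
--         done = False
--         while i < n:
--             a = A[i]
--             cnt[a] -= 1
--             if a < mex:
--                 seen.add(a)
--             i += 1
--             if len(seen) >= mex:
--                 done = True
--                 break
--         if not done:
--             break
--         res.append(mex)
--     return res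
-- ===== Notes on version B (the rewrite author's own statement) =====
-- stated objective: alternative
-- what changed: Replaces A's single pass with incrementally-maintained nmex by an explicit segment loop that rescans the suffix count array from 0 for each segment's mex and consumes elements with an inner do-while until enough distinct values are seen.
-- outside the precondition, e.g. on solve(1, [-1]): A returns [], B returns [0]; on solve(2, [3]): A raises IndexError, B raises IndexError
import Mathlib
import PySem

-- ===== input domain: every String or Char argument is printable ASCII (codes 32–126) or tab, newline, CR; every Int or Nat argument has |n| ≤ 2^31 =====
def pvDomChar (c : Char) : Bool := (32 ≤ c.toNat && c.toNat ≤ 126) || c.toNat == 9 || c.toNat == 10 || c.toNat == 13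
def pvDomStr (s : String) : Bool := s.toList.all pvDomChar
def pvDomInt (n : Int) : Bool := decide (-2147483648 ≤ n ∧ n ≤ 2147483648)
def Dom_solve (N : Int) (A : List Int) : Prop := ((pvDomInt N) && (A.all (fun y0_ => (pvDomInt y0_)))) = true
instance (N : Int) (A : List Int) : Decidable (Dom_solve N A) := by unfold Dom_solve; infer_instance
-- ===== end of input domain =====

-- B is an alternative decomposition (explicit segment loop rescanning the count array for each
-- segment's mex) of A's one-pass greedy; equal return values on the stated precondition.

-- shared primitive helpers: both Pythons contain the literal statements
-- 'cnt = [0]*(N+1)', 'cnt[a] += 1' and 'cnt[a] -= 1' (indices are in range under Pre_solve)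
def cntGet (cnt : List Int) (a : Int) : Int := cnt.getD a.toNat 0
def cntInc (cnt : List Int) (a : Int) : List Int := cnt.set a.toNat (cntGet cnt a + 1)
def cntDec (cnt : List Int) (a : Int) : List Int := cnt.set a.toNat (cntGet cnt a - 1)
def buildCnt (N : Int) (A : List Int) : List Int :=
  A.foldl (fun c a => cntInc c a) (List.replicate (N + 1).toNat 0)

-- ===== PORT A =====
-- 'for a, c in enumerate(cnt): if c == 0: mex = a; break' (initial mex = N+1)
def firstZeroA : List Int → Int → Int → Int
  | [], _, m => m
  | c :: r, i, m => if c = 0 then i else firstZeroA r (i + 1) m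

-- the main 'for a in A:' loop, state (cnt, res, seen, mex, nmex)
def loopA : List Int → List Int → List Int → PySem.Set Int → Int → Int → List Int
  | [], _, res, _, _, _ => res
  | a :: rest, cnt, res, seen, mex, nmex =>
    let seen' := if a < mex then PySem.Set.add seen a else seen
    let cnt' := cntDec cnt a
    let nmex' := if cntGet cnt' a = 0 then min nmex a else nmex
    if (seen'.length : Int) = mex then
      loopA rest cnt' (res ++ [mex]) PySem.Set.empty nmex' nmex'
    else
      loopA rest cnt' res seen' mex nmex'

def solve (N : Int) (A : List Int) : List Int :=
  let cnt := buildCnt N A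
  let mex := firstZeroA cnt 0 (N + 1)
  loopA A cnt [] PySem.Set.empty mex mex

-- ===== PORT B =====
-- 'mex = 0; while mex <= N and cnt[mex] != 0: mex += 1' — first index of cnt holding 0, else len cnt
def mexScan : List Int → Int
  | [] => 0
  | c :: r => if c = 0 then 0 else mexScan r + 1

-- inner do-while: consume elements, stop as soon as len(seen) >= mex; returns (cnt, rest, done)
def consumeB : List Int → List Int → Int → PySem.Set Int → List Int × List Int × Bool
  | cnt, [], _, _ => (cnt, [], false)
  | cnt, a :: rest, mex, seen =>
    let cnt' := cntDec cnt a
    let seen' := if a < mex then PySem.Set.add seen a else seen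
    if mex ≤ (seen'.length : Int) then (cnt', rest, true)
    else consumeB cnt' rest mex seen'

-- outer 'while i < n' loop; fuel = number of unconsumed elements bounds the iterations
def outerB : Nat → List Int → List Int → List Int
  | 0, _, _ => []
  | _, _, [] => []
  | fuel + 1, cnt, rest =>
    let mex := mexScan cnt
    match consumeB cnt rest mex PySem.Set.empty with
    | (cnt', rest', true) => mex :: outerB fuel cnt' rest'
    | (_, _, false) => []

def solve_alt (N : Int) (A : List Int) : List Int :=
  outerB A.length (buildCnt N A) A

-- ===== PRECONDITION & SPEC =====
-- Pre_ restricts to the problem's natural domain: every element in [0, N]. Elements above N (or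
-- below -(N+1)) make A raise IndexError; negative elements hit Python's negative-index
-- wraparound in the count array, an accident of A's list indexing outside the task's domain.
def Pre_solve (N : Int) (A : List Int) : Prop := ∀ a ∈ A, 0 ≤ a ∧ a ≤ N
instance (N : Int) (A : List Int) : Decidable (Pre_solve N A) := by unfold Pre_solve; infer_instance
def pvWitness_solve : Int × List Int := (3, [0, 1, 2, 0, 1, 3])

def Spec_solve (N : Int) (A : List Int) (out : List Int) : Prop := out = solve_alt N A
instance (N : Int) (A : List Int) (out : List Int) : Decidable (Spec_solve N A out) := by unfold Spec_solve; infer_instance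

-- ===== CLAIM (what is proved, stated in full; the proofs are below) =====
def Claim_equal_solve : Prop := ∀ (N : Int) (A : List Int), Dom_solve N A → Pre_solve N A → Spec_solve N A (solve N A)

-- ===== LEMMAS AND PROOFS =====

-- counts invariant: cnt has length (N+1) and holds the multiplicities of the remaining list
def Counts (cnt rest : List Int) : Prop :=
  ∀ v : Nat, v < cnt.length → cnt.getD v 0 = rest.count (v : Int)

def Elems (cnt rest : List Int) : Prop := ∀ a ∈ rest, 0 ≤ a ∧ a.toNat < cnt.length

theorem cntGet_natCast (cnt : List Int) (v : Nat) : cntGet cnt (v : Int) = cnt.getD v 0 := by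
  simp [cntGet]

theorem getD_set_self (l : List Int) (i : Nat) (x : Int) (h : i < l.length) :
    (l.set i x).getD i 0 = x := by
  simp [List.getD_eq_getElem?_getD, h]

theorem getD_set_ne (l : List Int) (i j : Nat) (x : Int) (h : i ≠ j) :
    (l.set i x).getD j 0 = l.getD j 0 := by
  simp [List.getD_eq_getElem?_getD, List.getElem?_set_ne h]

-- mexScan characterization
theorem mexScan_nonneg (cnt : List Int) : 0 ≤ mexScan cnt := by
  induction cnt with
  | nil => simp [mexScan]
  | cons c r ih => simp only [mexScan]; split <;> omega

theorem mexScan_le_length (cnt : List Int) : mexScan cnt ≤ (cnt.length : Int) := by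
  induction cnt with
  | nil => simp [mexScan]
  | cons c r ih => simp only [mexScan, List.length_cons]; split <;> push_cast <;> omega

theorem mexScan_pos_of_lt (cnt : List Int) (v : Nat) (h : (v : Int) < mexScan cnt) :
    cnt.getD v 0 ≠ 0 := by
  induction cnt generalizing v with
  | nil => exact absurd h (by simp [mexScan])
  | cons c r ih =>
    simp only [mexScan] at h
    by_cases hc : c = 0
    · simp [hc] at h; omega
    · simp only [hc, if_false] at h
      cases v with
      | zero => simpa using hc
      | succ w =>
        have : (w : Int) < mexScan r := by push_cast at h ⊢; omega
        simpa using ih w this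

theorem mexScan_zero_of_lt (cnt : List Int) (h : mexScan cnt < (cnt.length : Int)) :
    cnt.getD (mexScan cnt).toNat 0 = 0 := by
  induction cnt with
  | nil => simp [mexScan] at h
  | cons c r ih =>
    simp only [mexScan] at h ⊢
    by_cases hc : c = 0
    · simp [hc]
    · simp only [hc, if_false] at h ⊢
      have hr : mexScan r < (r.length : Int) := by
        simp only [List.length_cons] at h; push_cast at h; omega
      have h0 := mexScan_nonneg r
      have : (mexScan r + 1).toNat = (mexScan r).toNat + 1 := by omega
      rw [this]
      simpa using ih hr

theorem mexScan_unique (cnt : List Int) (m : Int) (h0 : 0 ≤ m) (h1 : m ≤ (cnt.length : Int))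
    (h2 : ∀ v : Nat, (v : Int) < m → cnt.getD v 0 ≠ 0)
    (h3 : m < (cnt.length : Int) → cnt.getD m.toNat 0 = 0) : m = mexScan cnt := by
  rcases lt_trichotomy m (mexScan cnt) with h | h | h
  · have hml : m < (cnt.length : Int) := lt_of_lt_of_le h (mexScan_le_length cnt)
    have h4 := h3 hml
    have h5 := mexScan_pos_of_lt cnt m.toNat (by omega)
    exact absurd h4 h5
  · exact h
  · have hlt : mexScan cnt < (cnt.length : Int) := lt_of_lt_of_le h h1
    have hz := mexScan_zero_of_lt cnt hlt
    have : ((mexScan cnt).toNat : Int) < m := by have := mexScan_nonneg cnt; omega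
    exact absurd hz (h2 (mexScan cnt).toNat this)

-- decrementing a present element: counts preserved, mexScan updates like A's nmex
theorem counts_dec (cnt : List Int) (a : Int) (rest : List Int)
    (hC : Counts cnt (a :: rest)) (ha : 0 ≤ a) (hlen : a.toNat < cnt.length) :
    Counts (cntDec cnt a) rest := by
  intro v hv
  simp only [cntDec, List.length_set] at hv ⊢
  by_cases hva : v = a.toNat
  · subst hva
    rw [getD_set_self _ _ _ hlen]
    have hc := hC a.toNat hv
    show cnt.getD a.toNat 0 - 1 = _
    rw [hc, show ((a.toNat : Int)) = a from by omega, List.count_cons_self]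
    push_cast; ring
  · rw [getD_set_ne _ _ _ _ (by omega)]
    have hc := hC v hv
    have hne : (v : Int) ≠ a := by omega
    rw [hc, List.count_cons, if_neg (by simpa using Ne.symm hne)]
    simp

theorem mexScan_dec (cnt : List Int) (a : Int) (ha : 0 ≤ a) (_hlen : a.toNat < cnt.length)
    (hpos : cntGet cnt a ≠ 0) :
    mexScan (cntDec cnt a) =
      if cntGet (cntDec cnt a) a = 0 then min (mexScan cnt) a else mexScan cnt := by
  have hlen' : ((cntDec cnt a).length : Int) = (cnt.length : Int) := by simp [cntDec]
  by_cases hz : cntGet (cntDec cnt a) a = 0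
  · simp only [hz, if_true]
    refine (mexScan_unique _ _ ?_ ?_ ?_ ?_).symm
    · have := mexScan_nonneg cnt; omega
    · have := mexScan_le_length cnt; rw [hlen']; omega
    · intro v hv
      have hv1 : (v : Int) < mexScan cnt := by omega
      have hv2 : (v : Int) < a := by omega
      have hvne : v ≠ a.toNat := by omega
      simp only [cntDec]
      rw [getD_set_ne _ _ _ _ (by omega)]
      exact mexScan_pos_of_lt cnt v hv1
    · intro _
      by_cases hma : min (mexScan cnt) a = a
      · rw [hma]
        simpa [cntGet] using hz
      · have hlt : mexScan cnt < a := by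
          rcases min_cases (mexScan cnt) a with ⟨h1, h2⟩ | ⟨h1, h2⟩ <;> omega
        have hm : min (mexScan cnt) a = mexScan cnt := by omega
        rw [hm]
        have hltl : mexScan cnt < (cnt.length : Int) := by omega
        simp only [cntDec]
        rw [getD_set_ne _ _ _ _ (by have := mexScan_nonneg cnt; omega)]
        exact mexScan_zero_of_lt cnt hltl
  · simp only [hz, if_false]
    refine (mexScan_unique _ _ ?_ ?_ ?_ ?_).symm
    · exact mexScan_nonneg cnt
    · rw [hlen']; exact mexScan_le_length cnt
    · intro v hv
      by_cases hvne : v = a.toNat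
      · subst hvne; simpa [cntGet] using hz
      · simp only [cntDec]
        rw [getD_set_ne _ _ _ _ (by omega)]
        exact mexScan_pos_of_lt cnt v hv
    · intro hm
      have hma : (mexScan cnt).toNat ≠ a.toNat := by
        intro hEq
        apply hpos
        have hlt : mexScan cnt < (cnt.length : Int) := by omega
        have h0 := mexScan_zero_of_lt cnt hlt
        show cnt.getD a.toNat 0 = 0
        rw [← hEq]; exact h0
      simp only [cntDec]
      rw [getD_set_ne _ _ _ _ (fun h => hma h.symm)]
      exact mexScan_zero_of_lt cnt (by omega)

-- Set.add grows the length by at most one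
theorem set_add_length (s : PySem.Set Int) (a : Int) :
    (PySem.Set.add s a).length ≤ s.length + 1 := by
  simp only [PySem.Set.add]
  split <;> simp

-- INNER: within a segment, A's loop agrees with B's consumeB / rescan pattern
theorem inner (rest : List Int) : ∀ (cnt res : List Int) (seen : PySem.Set Int) (mex : Int),
    Counts cnt rest → Elems cnt rest →
    ((seen.length : Int) < mex ∨ (mex = 0 ∧ seen = PySem.Set.empty)) →
    loopA rest cnt res seen mex (mexScan cnt) =
      (match consumeB cnt rest mex seen with
       | (cnt', rest', true) => loopA rest' cnt' (res ++ [mex]) PySem.Set.empty (mexScan cnt') (mexScan cnt')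
       | (_, _, false) => res) := by
  induction rest with
  | nil => intro cnt res seen mex _ _ _; simp [loopA, consumeB]
  | cons a rest ih =>
    intro cnt res seen mex hC hE hS
    have ha : 0 ≤ a ∧ a.toNat < cnt.length := hE a (by simp)
    have hpos : cntGet cnt a ≠ 0 := by
      rw [show a = ((a.toNat : Int)) from by omega, cntGet_natCast]
      have := hC a.toNat ha.2
      rw [this, show ((a.toNat : Int)) = a from by omega]
      have : 0 < (a :: rest).count a := by simp
      omega
    have hdec := mexScan_dec cnt a ha.1 ha.2 hpos
    have hC' : Counts (cntDec cnt a) rest := counts_dec cnt a rest hC ha.1 ha.2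
    have hE' : Elems (cntDec cnt a) rest := by
      intro x hx
      have := hE x (by simp [hx])
      simpa [cntDec] using this
    have hslen : (((if a < mex then PySem.Set.add seen a else seen).length : Int)) ≤ mex := by
      have hadd := set_add_length seen a
      rcases hS with h | ⟨h1, h2⟩
      · split
        · omega
        · omega
      · subst h1; subst h2
        rw [if_neg (by omega)]
        simp [PySem.Set.empty]
    simp only [loopA, consumeB]
    by_cases hfire : (((if a < mex then PySem.Set.add seen a else seen).length : Int)) = mex
    · have hge : mex ≤ (((if a < mex then PySem.Set.add seen a else seen).length : Int)) := le_of_eq hfire.symm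
      rw [if_pos hfire, if_pos hge]
      show _ = loopA rest (cntDec cnt a) (res ++ [mex]) PySem.Set.empty
        (mexScan (cntDec cnt a)) (mexScan (cntDec cnt a))
      rw [hdec]
    · have hnle : ¬ mex ≤ (((if a < mex then PySem.Set.add seen a else seen).length : Int)) := by omega
      rw [if_neg hfire, if_neg hnle]
      show loopA rest (cntDec cnt a) res _ mex _ = _
      rw [show (if cntGet (cntDec cnt a) a = 0 then min (mexScan cnt) a else mexScan cnt)
            = mexScan (cntDec cnt a) from hdec.symm]
      exact ih (cntDec cnt a) res _ mex hC' hE' (Or.inl (by omega))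

-- consumeB strictly shortens a nonempty rest and preserves the invariants
theorem consumeB_spec (rest : List Int) : ∀ (cnt : List Int) (seen : PySem.Set Int) (mex : Int),
    Counts cnt rest → Elems cnt rest →
    (consumeB cnt rest mex seen).2.1.length ≤ rest.length - 1 ∧
    Counts (consumeB cnt rest mex seen).1 (consumeB cnt rest mex seen).2.1 ∧
    Elems (consumeB cnt rest mex seen).1 (consumeB cnt rest mex seen).2.1 := by
  induction rest with
  | nil =>
    intro cnt seen mex hC hE
    exact ⟨by simp [consumeB], by simpa [consumeB] using hC, by simpa [consumeB] using hE⟩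
  | cons a rest ih =>
    intro cnt seen mex hC hE
    have ha : 0 ≤ a ∧ a.toNat < cnt.length := hE a (by simp)
    have hC' : Counts (cntDec cnt a) rest := counts_dec cnt a rest hC ha.1 ha.2
    have hE' : Elems (cntDec cnt a) rest := by
      intro x hx; simpa [cntDec] using hE x (by simp [hx])
    simp only [consumeB]
    by_cases hb : mex ≤ (((if a < mex then PySem.Set.add seen a else seen).length : Int))
    · rw [if_pos hb]
      exact ⟨by show rest.length ≤ (a :: rest).length - 1; simp, hC', hE'⟩
    · rw [if_neg hb]
      have hrec := ih (cntDec cnt a) (if a < mex then PySem.Set.add seen a else seen) mex hC' hE'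
      refine ⟨?_, hrec.2.1, hrec.2.2⟩
      have h1 := hrec.1
      simp only [List.length_cons]
      omega

-- OUTER: stitch segments together
theorem outer (fuel : Nat) : ∀ (rest cnt res : List Int),
    rest.length ≤ fuel → Counts cnt rest → Elems cnt rest →
    loopA rest cnt res PySem.Set.empty (mexScan cnt) (mexScan cnt) =
      res ++ outerB fuel cnt rest := by
  induction fuel with
  | zero =>
    intro rest cnt res hf _ _
    have : rest = [] := List.eq_nil_of_length_eq_zero (by omega)
    subst this
    simp [loopA, outerB]
  | succ fuel ih =>
    intro rest cnt res hf hC hE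
    cases rest with
    | nil => simp [loopA, outerB]
    | cons a rest' =>
      have hS : ((PySem.Set.empty : PySem.Set Int).length : Int) < mexScan cnt ∨
          (mexScan cnt = 0 ∧ (PySem.Set.empty : PySem.Set Int) = PySem.Set.empty) := by
        have h0 := mexScan_nonneg cnt
        by_cases h : mexScan cnt = 0
        · exact Or.inr ⟨h, rfl⟩
        · exact Or.inl (by simp [PySem.Set.empty]; omega)
      rw [inner (a :: rest') cnt res PySem.Set.empty (mexScan cnt) hC hE hS]
      have hspec := consumeB_spec (a :: rest') cnt PySem.Set.empty (mexScan cnt) hC hE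
      simp only [outerB]
      rcases hcon : consumeB cnt (a :: rest') (mexScan cnt) PySem.Set.empty with ⟨cnt', rest2, done⟩
      rw [hcon] at hspec
      cases done with
      | false => simp
      | true =>
        simp only
        rw [ih rest2 cnt' (res ++ [mexScan cnt])
          (by have h1 := hspec.1; simp only [List.length_cons] at h1 hf; omega)
          hspec.2.1 hspec.2.2]
        simp

-- firstZeroA equals mexScan when the default is the length
theorem firstZeroA_eq (cnt : List Int) : ∀ i : Int,
    firstZeroA cnt i (i + cnt.length) = i + mexScan cnt := by
  induction cnt with
  | nil => intro i; simp [firstZeroA, mexScan]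
  | cons c r ih =>
    intro i
    simp only [firstZeroA, mexScan]
    by_cases hc : c = 0
    · simp [hc]
    · simp only [hc, if_false]
      have := ih (i + 1)
      rw [show i + ((c :: r).length : Int) = (i + 1) + r.length from by
        push_cast [List.length_cons]; ring]
      rw [this]; ring

-- buildCnt produces the counts of A
theorem counts_foldl (l : List Int) : ∀ (c : List Int) (k : List Int),
    (∀ v : Nat, v < c.length → c.getD v 0 = k.count (v : Int)) →
    (∀ a ∈ l, 0 ≤ a ∧ a.toNat < c.length) →
    ∀ v : Nat, v < (l.foldl (fun c a => cntInc c a) c).length →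
      (l.foldl (fun c a => cntInc c a) c).getD v 0 = (k ++ l).count (v : Int) := by
  induction l with
  | nil => intro c k hk _ v hv; simpa using hk v (by simpa using hv)
  | cons a l ih =>
    intro c k hk hE v hv
    simp only [List.foldl_cons]
    have ha := hE a (by simp)
    have hk' : ∀ v : Nat, v < (cntInc c a).length → (cntInc c a).getD v 0 = (k ++ [a]).count (v : Int) := by
      intro v hv
      simp only [cntInc, List.length_set] at hv ⊢
      by_cases hva : v = a.toNat
      · subst hva
        rw [getD_set_self _ _ _ ha.2]
        have hca : cntGet c a = (k.count a : Int) := by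
          show c.getD a.toNat 0 = _
          rw [hk _ ha.2, show ((a.toNat : Int)) = a from by omega]
        rw [hca, show ((a.toNat : Int)) = a from by omega, List.count_append]
        have : [a].count a = 1 := by simp
        rw [this]; push_cast; ring
      · rw [getD_set_ne _ _ _ _ (by omega), hk _ hv]
        rw [List.count_append]
        have : [a].count (v : Int) = 0 := by
          simp [List.count_cons]; omega
        rw [this]; simp
    have hE' : ∀ x ∈ l, 0 ≤ x ∧ x.toNat < (cntInc c a).length := by
      intro x hx; simpa [cntInc] using hE x (by simp [hx])
    have := ih (cntInc c a) (k ++ [a]) hk' hE' v (by simpa using hv)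
    simpa using this

theorem counts_buildCnt (N : Int) (A : List Int) (hP : Pre_solve N A) (_hN : 0 ≤ N) :
    Counts (buildCnt N A) A ∧ Elems (buildCnt N A) A := by
  have hlen : ∀ (l : List Int) (c : List Int), (l.foldl (fun c a => cntInc c a) c).length = c.length := by
    intro l
    induction l with
    | nil => intro c; simp
    | cons a l ih => intro c; simpa [List.foldl_cons, cntInc] using ih (cntInc c a)
  have hlenb : (buildCnt N A).length = (N + 1).toNat := by
    simp [buildCnt, hlen]
  have hE : ∀ a ∈ A, 0 ≤ a ∧ a.toNat < (List.replicate (N + 1).toNat (0 : Int)).length := by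
    intro a haA
    have := hP a haA
    constructor
    · exact this.1
    · simp; omega
  refine ⟨?_, ?_⟩
  · intro v hv
    have := counts_foldl A (List.replicate (N + 1).toNat 0) []
      (by intro v hv; simp) hE v (by simpa [buildCnt] using hv)
    simpa [buildCnt] using this
  · intro a haA
    have := hP a haA
    refine ⟨this.1, ?_⟩
    rw [hlenb]; omega

-- ===== VERDICT (by name: the statement is the Claim_ definition above) =====
theorem solve_spec : Claim_equal_solve := by
  intro N A _ hP
  unfold Spec_solve solve solve_alt
  cases A with
  | nil => simp [loopA, outerB, List.length_nil]
  | cons a0 A' =>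
    have hN : 0 ≤ N := by
      have := hP a0 (by simp)
      omega
    have hCE := counts_buildCnt N (a0 :: A') hP hN
    have hlenb : ((buildCnt N (a0 :: A')).length : Int) = N + 1 := by
      have hlen : ∀ (l : List Int) (c : List Int), (l.foldl (fun c a => cntInc c a) c).length = c.length := by
        intro l
        induction l with
        | nil => intro c; simp
        | cons a l ih => intro c; simpa [List.foldl_cons, cntInc] using ih (cntInc c a)
      have h := hlen (a0 :: A') (List.replicate (N + 1).toNat 0)
      unfold buildCnt
      rw [h, List.length_replicate]
      omega
    have hfz : firstZeroA (buildCnt N (a0 :: A')) 0 (N + 1) = mexScan (buildCnt N (a0 :: A')) := by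
      have := firstZeroA_eq (buildCnt N (a0 :: A')) 0
      rw [hlenb] at this
      simpa using this
    simp only [hfz]
    have := outer (a0 :: A').length (a0 :: A') (buildCnt N (a0 :: A')) [] (le_refl _) hCE.1 hCE.2
    simpa using this
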